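-- pv_equiv track=rewrite | github.com/Presto-bit/aipodcast | backend/app.py | _split_new_segment_head_and_rest
-- ===== SOURCE A (Python) =====
-- def _split_new_segment_head_and_rest(new_part: str, max_speaker_lines: int = 3):
--     raw_lines = new_part.split("\n")
--     out_idx = 0
--     sp_count = 0
--     for i, ln in enumerate(raw_lines):
--         s = ln.strip()
--         if s.startswith("Speaker1:") or s.startswith("Speaker2:"):
--             sp_count += 1
--             out_idx = i + 1
--             if sp_count >= max_speaker_lines:
--                 break
--     head = "\n".join(raw_lines[:out_idx]).strip()
--     rest = "\n".join(raw_lines[out_idx:])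
--     return head, rest
-- ===== SOURCE B (Python) =====
-- def _split_new_segment_head_and_rest(new_part: str, max_speaker_lines: int = 3):
--     raw_lines = new_part.split("\n")
--     idx = [i for i, ln in enumerate(raw_lines)
--            if ln.strip().startswith(("Speaker1:", "Speaker2:"))]
--     if idx and max_speaker_lines > 0:
--         out_idx = idx[min(max_speaker_lines, len(idx)) - 1] + 1
--     else:
--         out_idx = 0
--     return "\n".join(raw_lines[:out_idx]).strip(), "\n".join(raw_lines[out_idx:])
-- ===== Notes on version B (the rewrite author's own statement) =====
-- stated objective: simpler
-- what changed: B replaces A's stateful scan-with-early-break (counter, running out_idx) by one filter pass that collects all speaker-line indices and then computes the split point by indexing that table.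
-- intended difference: When max_speaker_lines <= 0 and the text contains a speaker line, A still puts the first speaker line into head (its break test runs only after counting it), while B returns an empty head and the whole text as rest, which is what requesting at most zero speaker lines means. — e.g. on _split_new_segment_head_and_rest("Speaker1: hi\nrest", 0): A returns ("Speaker1: hi", "rest"), B returns ("", "Speaker1: hi\nrest")
import Mathlib
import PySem

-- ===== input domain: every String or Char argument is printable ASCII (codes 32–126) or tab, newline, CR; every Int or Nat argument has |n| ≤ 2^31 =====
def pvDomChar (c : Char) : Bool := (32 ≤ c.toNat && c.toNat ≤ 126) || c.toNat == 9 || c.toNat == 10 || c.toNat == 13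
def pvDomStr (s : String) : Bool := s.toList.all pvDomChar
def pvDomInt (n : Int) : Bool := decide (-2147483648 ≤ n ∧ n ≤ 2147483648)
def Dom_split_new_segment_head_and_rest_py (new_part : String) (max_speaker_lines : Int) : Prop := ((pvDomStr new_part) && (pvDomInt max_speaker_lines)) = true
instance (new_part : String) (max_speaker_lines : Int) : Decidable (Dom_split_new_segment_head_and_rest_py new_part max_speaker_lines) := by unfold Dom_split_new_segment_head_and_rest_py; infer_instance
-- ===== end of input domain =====

-- B differs from A by decomposition (filter pass + table indexing instead of a stateful
-- scan with early break); on non-positive max_speaker_lines with a speaker line present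
-- the two return different values, stated below as the intended difference D_.

-- ===== PORT A =====
-- shared by both ports: is this line (after strip) a speaker line?
def pvIsSpeaker (ln : String) : Bool :=
  PySem.Str.startswith (PySem.Str.strip ln) "Speaker1:" ||
  PySem.Str.startswith (PySem.Str.strip ln) "Speaker2:"

-- A's for-loop with early break, state (i, out_idx, sp_count)
def pvALoop (maxL : Int) : List String → Int → Int → Int → Int
  | [], _, out_idx, _ => out_idx
  | ln :: rest, i, out_idx, sp_count =>
    if pvIsSpeaker ln then
      if sp_count + 1 ≥ maxL then i + 1
      else pvALoop maxL rest (i + 1) (i + 1) (sp_count + 1)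
    else pvALoop maxL rest (i + 1) out_idx sp_count

def split_new_segment_head_and_rest_py (new_part : String) (max_speaker_lines : Int) : String × String :=
  let raw_lines := (PySem.Str.split? new_part "\n").getD []  -- sep "\n" ≠ "", so split? = some; exact
  let out_idx := pvALoop max_speaker_lines raw_lines 0 0 0
  (PySem.Str.strip (PySem.Str.join "\n" (PySem.List.slice raw_lines none (some out_idx))),
   PySem.Str.join "\n" (PySem.List.slice raw_lines (some out_idx) none))

-- ===== PORT B =====
def split_new_segment_head_and_rest_py_alt (new_part : String) (max_speaker_lines : Int) : String × String :=
  let raw_lines := (PySem.Str.split? new_part "\n").getD []  -- sep "\n" ≠ "", so split? = some; exact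
  let idx := (PySem.List.enumerate raw_lines 0).filterMap
      (fun p => if pvIsSpeaker p.2 then some p.1 else none)
  let out_idx : Int :=
    if ¬ idx.isEmpty ∧ max_speaker_lines > 0 then
      PySem.List.pyGetD idx (min max_speaker_lines (idx.length : Int) - 1) 0 + 1
    else 0
  (PySem.Str.strip (PySem.Str.join "\n" (PySem.List.slice raw_lines none (some out_idx))),
   PySem.Str.join "\n" (PySem.List.slice raw_lines (some out_idx) none))

-- ===== PRECONDITION & SPEC =====
-- When max_speaker_lines <= 0 and the text contains a speaker line, A still puts the first
-- speaker line into head (its break test runs only after counting it), while B returns an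
-- empty head and the whole text as rest, which is what requesting at most zero speaker
-- lines means.
-- a line whose leading whitespace is followed by a speaker tag (stated over raw chars,
-- independently of either port's primitives)
def pvSpeakerLine (l : List Char) : Bool :=
  "Speaker1:".toList.isPrefixOf (l.dropWhile PySem.Chars.isspace) ||
  "Speaker2:".toList.isPrefixOf (l.dropWhile PySem.Chars.isspace)

def D_split_new_segment_head_and_rest_py (new_part : String) (max_speaker_lines : Int) : Prop :=
  max_speaker_lines ≤ 0 ∧
  (PySem.Chars.splitOn new_part.toList ['\n']).any pvSpeakerLine = true
instance (new_part : String) (max_speaker_lines : Int) : Decidable (D_split_new_segment_head_and_rest_py new_part max_speaker_lines) := by unfold D_split_new_segment_head_and_rest_py; infer_instance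

def Spec_split_new_segment_head_and_rest_py (new_part : String) (max_speaker_lines : Int) (out : String × String) : Prop := ¬ D_split_new_segment_head_and_rest_py new_part max_speaker_lines → out = split_new_segment_head_and_rest_py_alt new_part max_speaker_lines
instance (new_part : String) (max_speaker_lines : Int) (out : String × String) : Decidable (Spec_split_new_segment_head_and_rest_py new_part max_speaker_lines out) := by unfold Spec_split_new_segment_head_and_rest_py; infer_instance

def pvDiffWitness_split_new_segment_head_and_rest_py : String × Int := ("Speaker1: hi\nrest", 0)
def pvDiffWitnessOut_split_new_segment_head_and_rest_py : (String × String) × (String × String) :=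
  (("Speaker1: hi", "rest"), ("", "Speaker1: hi\nrest"))

-- ===== CLAIM (what is proved, stated in full; the proofs are below) =====
def Claim_unchanged_split_new_segment_head_and_rest_py : Prop := ∀ (new_part : String) (max_speaker_lines : Int), Dom_split_new_segment_head_and_rest_py new_part max_speaker_lines → Spec_split_new_segment_head_and_rest_py new_part max_speaker_lines (split_new_segment_head_and_rest_py new_part max_speaker_lines)
def Claim_changed_split_new_segment_head_and_rest_py : Prop := Dom_split_new_segment_head_and_rest_py (pvDiffWitness_split_new_segment_head_and_rest_py.1) (pvDiffWitness_split_new_segment_head_and_rest_py.2) ∧ D_split_new_segment_head_and_rest_py (pvDiffWitness_split_new_segment_head_and_rest_py.1) (pvDiffWitness_split_new_segment_head_and_rest_py.2) ∧ split_new_segment_head_and_rest_py (pvDiffWitness_split_new_segment_head_and_rest_py.1) (pvDiffWitness_split_new_segment_head_and_rest_py.2) = pvDiffWitnessOut_split_new_segment_head_and_rest_py.1 ∧ split_new_segment_head_and_rest_py_alt (pvDiffWitness_split_new_segment_head_and_rest_py.1) (pvDiffWitness_split_new_segment_head_and_rest_py.2) = pvDiffWitnessOut_split_new_segment_head_and_rest_py.2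 ∧ pvDiffWitnessOut_split_new_segment_head_and_rest_py.1 ≠ pvDiffWitnessOut_split_new_segment_head_and_rest_py.2

def Claim_exact_split_new_segment_head_and_rest_py : Prop := ∀ (new_part : String) (max_speaker_lines : Int), Dom_split_new_segment_head_and_rest_py new_part max_speaker_lines → D_split_new_segment_head_and_rest_py new_part max_speaker_lines → split_new_segment_head_and_rest_py new_part max_speaker_lines ≠ split_new_segment_head_and_rest_py_alt new_part max_speaker_lines

-- ===== LEMMAS AND PROOFS =====

-- the list of speaker-line indices of `lines`, offset by `i`
def pvIdxs : List String → Int → List Int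
  | [], _ => []
  | ln :: rest, i => if pvIsSpeaker ln then i :: pvIdxs rest (i + 1) else pvIdxs rest (i + 1)

theorem pvIdxs_eq_filterMap (lines : List String) (i : Int) :
    (PySem.List.enumerate lines i).filterMap (fun p => if pvIsSpeaker p.2 then some p.1 else none)
      = pvIdxs lines i := by
  induction lines generalizing i with
  | nil => simp [pvIdxs, PySem.List.enumerate_nil]
  | cons ln rest ih =>
    simp only [PySem.List.enumerate_cons, List.filterMap_cons, pvIdxs]
    by_cases h : pvIsSpeaker ln
    · simp [h, ih]
    · simp [h, ih]

theorem pvIdxs_nil_iff (lines : List String) (i : Int) :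
    pvIdxs lines i = [] ↔ lines.any pvIsSpeaker = false := by
  induction lines generalizing i with
  | nil => simp [pvIdxs]
  | cons ln rest ih =>
    simp only [pvIdxs, List.any_cons]
    by_cases h : pvIsSpeaker ln
    · simp [h]
    · simp [h, ih]

theorem pvRstrip_prefix (q : List Char) (c : Char) (hc : PySem.Chars.isspace c = false)
    (x : List Char) :
    (q ++ [c]).isPrefixOf (PySem.Chars.rstrip x) = (q ++ [c]).isPrefixOf x := by
  rw [Bool.eq_iff_iff, List.isPrefixOf_iff_prefix, List.isPrefixOf_iff_prefix]
  constructor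
  · intro h
    refine h.trans ?_
    have hs : List.dropWhile PySem.Chars.isspace x.reverse <:+ x.reverse :=
      List.dropWhile_suffix _
    have := List.reverse_suffix.mp
      (by simpa using hs :
        (List.dropWhile PySem.Chars.isspace x.reverse).reverse.reverse <:+ x.reverse)
    simpa [PySem.Chars.rstrip] using this
  · intro h
    obtain ⟨y, rfl⟩ := h
    unfold PySem.Chars.rstrip
    by_cases he : (List.dropWhile PySem.Chars.isspace y.reverse).isEmpty = true
    · simp [List.dropWhile_append, he, hc]
    · simp [List.dropWhile_append, he]

theorem pvIsSpeaker_eq (ln : String) : pvIsSpeaker ln = pvSpeakerLine ln.toList := by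
  unfold pvIsSpeaker pvSpeakerLine
  simp only [PySem.Str.startswith_eq, PySem.Str.toList_strip]
  simp only [PySem.Chars.startswith, PySem.Chars.strip, PySem.Chars.lstrip]
  rw [show ("Speaker1:".toList : List Char) = "Speaker1".toList ++ [':'] from by decide,
      show ("Speaker2:".toList : List Char) = "Speaker2".toList ++ [':'] from by decide,
      pvRstrip_prefix _ _ (by decide), pvRstrip_prefix _ _ (by decide)]

theorem pvAny_lines (s : String) :
    ((PySem.Str.split? s "\n").getD []).any pvIsSpeaker
      = (PySem.Chars.splitOn s.toList ['\n']).any pvSpeakerLine := by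
  have h := PySem.Str.split?_map s "\n"
  cases hs : PySem.Str.split? s "\n" with
  | none =>
    rw [hs, show ("\n".toList : List Char) = ['\n'] from by decide] at h
    unfold PySem.Chars.split? at h
    simp only [List.isEmpty_cons, Bool.false_eq_true, if_false] at h
    exact absurd h (by simp)
  | some L =>
    rw [hs] at h
    simp only [Option.map_some] at h
    rw [show ("\n".toList : List Char) = ['\n'] from by decide] at h
    rw [show PySem.Chars.split? s.toList ['\n']
        = some (PySem.Chars.splitOn s.toList ['\n']) from by simp [PySem.Chars.split?]] at h
    injection h with h
    rw [Option.getD_some, ← h, List.any_map]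
    exact congrArg L.any (funext fun a => by
      rw [Function.comp_apply, pvIsSpeaker_eq])

theorem pvALoop_eq (lines : List String) (maxL i out0 sp0 : Int) :
    pvALoop maxL lines i out0 sp0 =
      (match pvIdxs lines i with
       | [] => out0
       | idx => idx.getD (min (max 1 (maxL - sp0)).toNat idx.length - 1) 0 + 1) := by
  induction lines generalizing i out0 sp0 with
  | nil => simp [pvALoop, pvIdxs]
  | cons ln rest ih =>
    simp only [pvALoop, pvIdxs]
    by_cases h : pvIsSpeaker ln
    · simp only [h, if_true]
      by_cases hb : sp0 + 1 ≥ maxL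
      · have hn : (max 1 (maxL - sp0)).toNat = 1 := by omega
        simp [hb, hn]
      · have hge : 2 ≤ maxL - sp0 := by omega
        rw [if_neg hb, ih]
        cases hr : pvIdxs rest (i + 1) with
        | nil => simp
        | cons a as =>
          simp only [List.length_cons]
          rw [show min (max 1 (maxL - sp0)).toNat (as.length + 1 + 1) - 1
              = (min (max 1 (maxL - (sp0 + 1))).toNat (as.length + 1) - 1) + 1 from by omega,
            List.getD_cons_succ]
    · simp only [h]
      exact ih (i + 1) out0 sp0

theorem pvOut_eq (lines : List String) (maxL : Int)
    (hnd : ¬ (maxL ≤ 0 ∧ lines.any pvIsSpeaker = true)) :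
    (if ¬ ((pvIdxs lines 0).isEmpty = true) ∧ maxL > 0 then
       PySem.List.pyGetD (pvIdxs lines 0) (min maxL ((pvIdxs lines 0).length : Int) - 1) 0 + 1
     else (0 : Int))
      = pvALoop maxL lines 0 0 0 := by
  rw [pvALoop_eq]
  cases hr : pvIdxs lines 0 with
  | nil => simp
  | cons a as =>
    have hany : lines.any pvIsSpeaker = true := by
      cases h : lines.any pvIsSpeaker
      · have := (pvIdxs_nil_iff lines 0).2 h
        rw [this] at hr; cases hr
      · rfl
    have hpos : maxL > 0 := by
      by_contra hnp
      exact hnd ⟨by omega, hany⟩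
    have hnn : (0 : Int) ≤ min maxL ((a :: as).length : Int) - 1 := by
      simp only [List.length_cons]; omega
    rw [if_pos ⟨by simp, hpos⟩, PySem.List.pyGetD_of_nonneg _ _ hnn]
    have ht : (min maxL ((a :: as).length : Int) - 1).toNat
        = min (max 1 (maxL - 0)).toNat (a :: as).length - 1 := by
      simp only [List.length_cons]; omega
    rw [ht]

theorem pvIdxs_head (lines : List String) (i a : Int) (as : List Int)
    (h : pvIdxs lines i = a :: as) :
    ∃ k : Nat, a = i + k ∧ k < lines.length ∧ pvIsSpeaker (lines.getD k "") = true := by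
  induction lines generalizing i with
  | nil => simp [pvIdxs] at h
  | cons ln rest ih =>
    simp only [pvIdxs] at h
    by_cases hs : pvIsSpeaker ln
    · rw [if_pos hs] at h
      injection h with h1 _
      exact ⟨0, by omega, by simp, by simpa [← h1] using hs⟩
    · rw [if_neg hs] at h
      obtain ⟨k, hk1, hk2, hk3⟩ := ih (i + 1) h
      exact ⟨k + 1, by omega, by simpa using hk2, by simpa using hk3⟩

theorem pvJoin_len_lt (parts : List (List Char)) (k : Nat) (hk : k < parts.length)
    (h1 : 1 ≤ (parts.getD k []).length) :
    (List.intercalate ['\n'] (parts.drop (k + 1))).length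
      < (List.intercalate ['\n'] parts).length := by
  induction parts generalizing k with
  | nil => simp at hk
  | cons p rest ih =>
    cases k with
    | zero =>
      simp only [List.getD_cons_zero] at h1
      cases rest with
      | nil => simpa [List.intercalate] using h1
      | cons y t =>
        simp only [List.drop_succ_cons, List.drop_zero]
        rw [show List.intercalate ['\n'] (p :: y :: t)
            = p ++ ['\n'] ++ List.intercalate ['\n'] (y :: t) from by simp [List.intercalate]]
        simp only [List.length_append, List.length_cons]
        omega
    | succ k =>
      have hk' : k < rest.length := by simpa using hk
      have h1' : 1 ≤ (rest.getD k []).length := by simpa using h1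
      simp only [List.drop_succ_cons]
      cases rest with
      | nil => simp at hk'
      | cons y t =>
        have hih := ih k hk' h1'
        rw [show List.intercalate ['\n'] (p :: y :: t)
            = p ++ ['\n'] ++ List.intercalate ['\n'] (y :: t) from by simp [List.intercalate]]
        simp only [List.length_append, List.length_cons]
        omega

theorem pvSpeaker_len (s : String) (h : pvIsSpeaker s = true) : 1 ≤ s.toList.length := by
  rw [pvIsSpeaker_eq] at h
  unfold pvSpeakerLine at h
  have hd := List.length_dropWhile_le PySem.Chars.isspace s.toList
  rcases Bool.or_eq_true_iff.mp h with h | h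
  · have hp := (List.isPrefixOf_iff_prefix.mp h).length_le
    have h9 : ("Speaker1:".toList).length = 9 := by decide
    omega
  · have hp := (List.isPrefixOf_iff_prefix.mp h).length_le
    have h9 : ("Speaker2:".toList).length = 9 := by decide
    omega

-- ===== VERDICT (by name: the statement is the Claim_ definition above) =====
theorem split_new_segment_head_and_rest_py_spec : Claim_unchanged_split_new_segment_head_and_rest_py := by
  intro new_part maxL _ hnd
  unfold D_split_new_segment_head_and_rest_py at hnd
  unfold split_new_segment_head_and_rest_py split_new_segment_head_and_rest_py_alt
  simp only [pvIdxs_eq_filterMap]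
  rw [pvOut_eq _ _ (by rw [pvAny_lines]; exact hnd)]

theorem split_new_segment_head_and_rest_py_changed : Claim_changed_split_new_segment_head_and_rest_py := by
  unfold Claim_changed_split_new_segment_head_and_rest_py; decide

set_option maxHeartbeats 1000000 in
theorem split_new_segment_head_and_rest_py_tight : Claim_exact_split_new_segment_head_and_rest_py := by
  intro new_part maxL _ hd heq
  obtain ⟨hm, hany⟩ := hd
  rw [← pvAny_lines] at hany
  have heq2 := congrArg Prod.snd heq
  simp only [split_new_segment_head_and_rest_py, split_new_segment_head_and_rest_py_alt] at heq2
  cases hr : pvIdxs ((PySem.Str.split? new_part "\n").getD []) 0 with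
  | nil =>
    rw [pvIdxs_nil_iff] at hr
    rw [hr] at hany
    cases hany
  | cons a as =>
    obtain ⟨k, hk0, hkl, hks⟩ := pvIdxs_head _ 0 a as hr
    rw [pvALoop_eq, hr] at heq2
    rw [pvIdxs_eq_filterMap, hr] at heq2
    have hA : (match (a :: as : List Int) with
        | [] => (0 : Int)
        | idx => idx.getD (min (max 1 (maxL - 0)).toNat idx.length - 1) 0 + 1)
        = (a :: as).getD (min (max 1 (maxL - 0)).toNat (a :: as).length - 1) 0 + 1 := rfl
    rw [hA] at heq2
    have hsel : min (max 1 (maxL - 0)).toNat (a :: as).length - 1 = 0 := by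
      simp only [List.length_cons]
      omega
    rw [hsel] at heq2
    rw [if_neg (fun hcond => absurd hcond.2 (by omega))] at heq2
    simp only [List.getD_cons_zero] at heq2
    rw [PySem.List.slice_zero_start, PySem.List.slice_none_none] at heq2
    have hkc : a + 1 = ((k + 1 : Nat) : Int) := by omega
    rw [hkc, PySem.List.slice_from _ (by positivity)] at heq2
    rw [Int.toNat_natCast] at heq2
    have hlen := congrArg (fun s : String => s.toList.length) heq2
    simp only [PySem.Str.toList_join] at hlen
    rw [show ("\n".toList : List Char) = ['\n'] from by decide] at hlen
    unfold PySem.Chars.join at hlen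
    rw [List.map_drop] at hlen
    have hmap : ((((PySem.Str.split? new_part "\n").getD []).map String.toList).getD k [])
        = (((PySem.Str.split? new_part "\n").getD []).getD k "").toList := by
      have := List.getD_map ((PySem.Str.split? new_part "\n").getD []) "" (n := k) String.toList
      simpa using this
    have h1 : 1 ≤ ((((PySem.Str.split? new_part "\n").getD []).map String.toList).getD k []).length := by
      rw [hmap]
      exact pvSpeaker_len _ hks
    have hkl' : k < (((PySem.Str.split? new_part "\n").getD []).map String.toList).length := by
      simpa using hkl
    have := pvJoin_len_lt (((PySem.Str.split? new_part "\n").getD []).map String.toList) k hkl' h1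
    omega
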